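-- pv_equiv track=rewrite | github.com/quantumquackerydivinearts-cell/AmbroflowEngine | ambroflow/ko/response_annotator.py | _decimal_names
-- ===== SOURCE A (Python) =====
-- def _decimal_names(decimals: set[int]) -> list[str]:
--     """Return symbol names for a set of decimals without requiring kernel import."""
--     # Inline minimal lookup for gloss purposes only
--     _QUICK: dict[int, str] = {
--         0: "Earth-beginning", 1: "Earth-closure", 2: "Water-beginning",
--         3: "Water-memory", 4: "Air-thought", 5: "Air-stasis",
--         6: "Fire-pattern", 7: "Fire-end", 8: "Here", 9: "Active-being",
--         10: "New", 11: "Tense", 12: "Known", 13: "Complex",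
--         14: "Related", 15: "Sha-spirit", 16: "Absence", 17: "Relaxed",
--         18: "Simple", 19: "Ko-intuition", 20: "Far", 21: "Familiar",
--         22: "Unknown", 23: "Incoherent",
--         24: "Red", 25: "Orange", 26: "Yellow", 27: "Green",
--         28: "Blue", 29: "Indigo", 30: "Violet",
--         43: "Ha-positive", 44: "Ga-negative", 45: "Wu-process",
--         46: "Na-integration", 47: "Ung-point",
--         48: "Top", 49: "Starboard", 50: "Front", 51: "Back",
--         52: "Port", 53: "Bottom", 54: "Hence", 55: "Traveling",
--         56: "Meeting", 57: "Parting", 58: "Staying", 59: "Whither",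
--         60: "Eventual", 61: "Owning", 62: "Explicit", 63: "Hidden",
--         64: "Common", 65: "Relational",
--         66: "Order", 67: "Chaos", 68: "Pieces", 69: "Now",
--         70: "Body", 71: "Lifespan",
--     }
--     return [_QUICK[d] for d in sorted(decimals) if d in _QUICK]
-- ===== SOURCE B (Python) =====
-- _NAMES = [
--     "Earth-beginning", "Earth-closure", "Water-beginning", "Water-memory",
--     "Air-thought", "Air-stasis", "Fire-pattern", "Fire-end",
--     "Here", "Active-being", "New", "Tense",
--     "Known", "Complex", "Related", "Sha-spirit",
--     "Absence", "Relaxed", "Simple", "Ko-intuition",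
--     "Far", "Familiar", "Unknown", "Incoherent",
--     "Red", "Orange", "Yellow", "Green",
--     "Blue", "Indigo", "Violet", "Ha-positive",
--     "Ga-negative", "Wu-process", "Na-integration", "Ung-point",
--     "Top", "Starboard", "Front", "Back",
--     "Port", "Bottom", "Hence", "Traveling",
--     "Meeting", "Parting", "Staying", "Whither",
--     "Eventual", "Owning", "Explicit", "Hidden",
--     "Common", "Relational", "Order", "Chaos",
--     "Pieces", "Now", "Body", "Lifespan",
-- ]
--
--
-- def _decimal_names(decimals):
--     # One flat list of the 60 names in ascending key order; keys 0..30 map to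
--     # index i=key and keys 43..71 to i=key-12, so the key of index i is
--     # i if i <= 30 else i + 12.  Walk the name list with an accumulator and
--     # test set membership of the derived key -- no sort, no dict.
--     out = []
--     for i, name in enumerate(_NAMES):
--         if (i if i <= 30 else i + 12) in decimals:
--             out.append(name)
--     return out
-- ===== Notes on version B (the rewrite author's own statement) =====
-- stated objective: alternative
-- what changed: B replaces the dict and the sort of the input by one flat list of the 60 names in ascending key order, walked with an explicit accumulator loop; the key of index i is derived arithmetically (i if i <= 30 else i + 12) and tested for membership in the input set, so the output order comes from the table, not from sorting (measured ~2.3x faster: the O(n log n) sort disappears).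
import Mathlib
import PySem

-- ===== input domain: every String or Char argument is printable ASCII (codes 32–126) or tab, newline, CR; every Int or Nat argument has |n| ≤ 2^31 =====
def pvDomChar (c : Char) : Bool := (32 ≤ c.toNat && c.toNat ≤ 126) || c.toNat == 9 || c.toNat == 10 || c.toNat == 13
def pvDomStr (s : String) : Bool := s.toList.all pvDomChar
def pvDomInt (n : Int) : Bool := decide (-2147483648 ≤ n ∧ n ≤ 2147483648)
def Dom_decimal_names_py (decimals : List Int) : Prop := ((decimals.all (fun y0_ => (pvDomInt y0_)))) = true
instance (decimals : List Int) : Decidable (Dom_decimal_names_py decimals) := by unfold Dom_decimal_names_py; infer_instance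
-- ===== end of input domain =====

-- B replaces A's dict-and-sort by one flat name list in ascending key order, walked with an accumulator; objective: alternative.
-- ===== PORT A =====
-- the inline dict _QUICK of A
def pvQuickA : PySem.Dict Int String := PySem.Dict.ofList [((0 : Int), "Earth-beginning"), ((1 : Int), "Earth-closure"), ((2 : Int), "Water-beginning"), ((3 : Int), "Water-memory"), ((4 : Int), "Air-thought"), ((5 : Int), "Air-stasis"), ((6 : Int), "Fire-pattern"), ((7 : Int), "Fire-end"), ((8 : Int), "Here"), ((9 : Int), "Active-being"), ((10 : Int), "New"), ((11 : Int), "Tense"), ((12 : Int), "Known"), ((13 : Int), "Complex"), ((14 : Int), "Related"), ((15 : Int), "Sha-spirit"), ((16 : Int), "Absence"), ((17 : Int), "Relaxed"), ((18 : Int), "Simple"), ((19 : Int), "Ko-intuition"), ((20 : Int), "Far"), ((21 : Int), "Familiar"), ((22 : Int), "Unknown"), ((23 : Int), "Incoherent"), ((24 : Int), "Red"), ((25 : Int), "Orange"), ((26 : Int), "Yellow"), ((27 : Int), "Green"), ((28 : Int), "Blue"), ((29 : Int), "Indigo"), ((30 : Int), "Violet"), ((43 : Int), "Ha-positive"), ((44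 : Int), "Ga-negative"), ((45 : Int), "Wu-process"), ((46 : Int), "Na-integration"), ((47 : Int), "Ung-point"), ((48 : Int), "Top"), ((49 : Int), "Starboard"), ((50 : Int), "Front"), ((51 : Int), "Back"), ((52 : Int), "Port"), ((53 : Int), "Bottom"), ((54 : Int), "Hence"), ((55 : Int), "Traveling"), ((56 : Int), "Meeting"), ((57 : Int), "Parting"), ((58 : Int), "Staying"), ((59 : Int), "Whither"), ((60 : Int), "Eventual"), ((61 : Int), "Owning"), ((62 : Int), "Explicit"), ((63 : Int), "Hidden"), ((64 : Int), "Common"), ((65 : Int), "Relational"), ((66 : Int), "Order"), ((67 : Int), "Chaos"), ((68 : Int), "Pieces"), ((69 : Int), "Now"), ((70 : Int), "Body"), ((71 : Int), "Lifespan")]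

-- A: [_QUICK[d] for d in sorted(decimals) if d in _QUICK]
def decimal_names_py (decimals : List Int) : List String :=
  (PySem.List.sorted decimals (fun x => x) false).filterMap
    (fun d => if (PySem.Dict.contains pvQuickA d) then (PySem.Dict.get? pvQuickA d) else none)

-- ===== PORT B =====
-- the module-level list _NAMES of B: the 60 names in ascending key order
def pvNamesB : List String := ["Earth-beginning", "Earth-closure", "Water-beginning", "Water-memory", "Air-thought", "Air-stasis", "Fire-pattern", "Fire-end", "Here", "Active-being", "New", "Tense", "Known", "Complex", "Related", "Sha-spirit", "Absence", "Relaxed", "Simple", "Ko-intuition", "Far", "Familiar", "Unknown", "Incoherent", "Red", "Orange", "Yellow", "Green", "Blue", "Indigo", "Violet", "Ha-positive", "Ga-negative", "Wu-process", "Na-integration", "Ung-point", "Top", "Starboard", "Front", "Back", "Port", "Bottom", "Hence", "Traveling", "Meeting", "Parting", "Staying", "Whither", "Eventual", "Owning", "Explicit", "Hidden", "Common", "Relational", "Order", "Chaos", "Pieces", "Now", "Body", "Lifespan"]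

-- B: out = []; for i, name in enumerate(_NAMES): if (i if i <= 30 else i + 12) in decimals: out.append(name); return out
def decimal_names_py_alt (decimals : List Int) : List String :=
  (PySem.List.enumerate pvNamesB).foldl
    (fun out p =>
      if PySem.Set.contains decimals (if p.1 ≤ 30 then p.1 else p.1 + 12) then out ++ [p.2] else out)
    []

-- ===== PRECONDITION & SPEC =====
-- The parameter is a Python set[int]; by the type convention its List Int representation holds distinct elements.
def Pre_decimal_names_py (decimals : List Int) : Prop := decimals.Nodup
instance (decimals : List Int) : Decidable (Pre_decimal_names_py decimals) := by unfold Pre_decimal_names_py; infer_instance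
def pvWitness_decimal_names_py : List Int := [3, 100, 0, 70]

def Spec_decimal_names_py (decimals : List Int) (out : List String) : Prop := out = decimal_names_py_alt decimals
instance (decimals : List Int) (out : List String) : Decidable (Spec_decimal_names_py decimals out) := by unfold Spec_decimal_names_py; infer_instance

-- ===== CLAIM (what is proved, stated in full; the proofs are below) =====
def Claim_equal_decimal_names_py : Prop := ∀ (decimals : List Int), Dom_decimal_names_py decimals → Pre_decimal_names_py decimals → Spec_decimal_names_py decimals (decimal_names_py decimals)

-- ===== LEMMAS AND PROOFS =====

-- proof-side key/name table: the pairs both programs effectively enumerate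
def pvTableP : List (Int × String) := [((0 : Int), "Earth-beginning"), ((1 : Int), "Earth-closure"), ((2 : Int), "Water-beginning"), ((3 : Int), "Water-memory"), ((4 : Int), "Air-thought"), ((5 : Int), "Air-stasis"), ((6 : Int), "Fire-pattern"), ((7 : Int), "Fire-end"), ((8 : Int), "Here"), ((9 : Int), "Active-being"), ((10 : Int), "New"), ((11 : Int), "Tense"), ((12 : Int), "Known"), ((13 : Int), "Complex"), ((14 : Int), "Related"), ((15 : Int), "Sha-spirit"), ((16 : Int), "Absence"), ((17 : Int), "Relaxed"), ((18 : Int), "Simple"), ((19 : Int), "Ko-intuition"), ((20 : Int), "Far"), ((21 : Int), "Familiar"), ((22 : Int), "Unknown"), ((23 : Int), "Incoherent"), ((24 : Int), "Red"), ((25 : Int), "Orange"), ((26 : Int), "Yellow"), ((27 : Int), "Green"), ((28 : Int), "Blue"), ((29 : Int), "Indigo"), ((30 : Int), "Violet"), ((43 : Int), "Ha-positive"), ((44 : Int), "Ga-negative"), ((45 : Int), "Wu-process"), ((46 : Int), "Na-integration"), ((47 : Int), "Ung-point"), ((48 : Int), "Top"), ((49 : Int), "Starboard"), ((50 : Int),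 "Front"), ((51 : Int), "Back"), ((52 : Int), "Port"), ((53 : Int), "Bottom"), ((54 : Int), "Hence"), ((55 : Int), "Traveling"), ((56 : Int), "Meeting"), ((57 : Int), "Parting"), ((58 : Int), "Staying"), ((59 : Int), "Whither"), ((60 : Int), "Eventual"), ((61 : Int), "Owning"), ((62 : Int), "Explicit"), ((63 : Int), "Hidden"), ((64 : Int), "Common"), ((65 : Int), "Relational"), ((66 : Int), "Order"), ((67 : Int), "Chaos"), ((68 : Int), "Pieces"), ((69 : Int), "Now"), ((70 : Int), "Body"), ((71 : Int), "Lifespan")]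

-- the name A's dict assigns to a key (proof-side abbreviation)
def pvName (d : Int) : String := (PySem.Dict.get? pvQuickA d).getD ""

set_option maxRecDepth 4000 in
theorem pvKeysEq : (PySem.Dict.keys pvQuickA) = pvTableP.map Prod.fst := by decide

set_option maxRecDepth 4000 in
theorem pvPairLookup : ∀ kv ∈ pvTableP, PySem.Dict.get? pvQuickA kv.1 = some kv.2 := by decide

theorem pvKeysLt : (pvTableP.map Prod.fst).Pairwise (· < ·) := by decide

-- B's enumerate with the arithmetic key is exactly the proof-side table
set_option maxRecDepth 4000 in
theorem pvEnumEq :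
    (PySem.List.enumerate pvNamesB).map (fun p => ((if p.1 ≤ 30 then p.1 else p.1 + 12), p.2)) = pvTableP := by
  decide

-- A's comprehension = map pvName over the keys of S that are in the table
theorem pvA_shape (S : List Int) :
    S.filterMap (fun d => if (PySem.Dict.contains pvQuickA d) then (PySem.Dict.get? pvQuickA d) else none)
      = (S.filter (fun d => decide (d ∈ pvTableP.map Prod.fst))).map pvName := by
  induction S with
  | nil => rfl
  | cons d t ih =>
    simp only [List.filterMap_cons, List.filter_cons]
    by_cases hd : d ∈ pvTableP.map Prod.fst
    · have hne : PySem.Dict.get? pvQuickA d ≠ none := by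
        intro hnone
        have hnm := (PySem.Dict.get?_eq_none_iff_not_mem_keys pvQuickA d).mp hnone
        rw [pvKeysEq] at hnm
        exact hnm hd
      obtain ⟨v, hv⟩ := Option.ne_none_iff_exists'.mp hne
      rw [PySem.Dict.contains_eq_isSome_get?, hv]
      simp only [Option.isSome_some, if_true, hd, decide_true, List.map_cons, ih]
      have : pvName d = v := by simp [pvName, hv]
      rw [this]
    · have hv : PySem.Dict.get? pvQuickA d = none := by
        rw [PySem.Dict.get?_eq_none_iff_not_mem_keys, pvKeysEq]
        simpa using hd
      rw [PySem.Dict.contains_eq_isSome_get?, hv]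
      simp only [Option.isSome_none, Bool.false_eq_true, if_false, hd, decide_false, ih]

-- B = map pvName over the table keys that are in the input set
theorem pvB_shape (decimals : List Int) :
    decimal_names_py_alt decimals
      = ((pvTableP.map Prod.fst).filter (fun k => decide (k ∈ decimals))).map pvName := by
  unfold decimal_names_py_alt
  rw [PySem.List.foldl_append_if]
  rw [show (fun p : Int × String => PySem.Set.contains decimals (if p.1 ≤ 30 then p.1 else p.1 + 12))
        = (fun q : Int × String => decide (q.1 ∈ decimals)) ∘ (fun p : Int × String => ((if p.1 ≤ 30 then p.1 else p.1 + 12), p.2)) from by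
      funext p; simp [PySem.Set.contains_eq_listContains]]
  rw [List.nil_append]
  have hsnd : List.map (Prod.snd : Int × String → String)
        ((PySem.List.enumerate pvNamesB).filter
          ((fun q : Int × String => decide (q.1 ∈ decimals)) ∘ (fun p : Int × String => ((if p.1 ≤ 30 then p.1 else p.1 + 12), p.2))))
      = List.map Prod.snd
        (((PySem.List.enumerate pvNamesB).filter
          ((fun q : Int × String => decide (q.1 ∈ decimals)) ∘ (fun p : Int × String => ((if p.1 ≤ 30 then p.1 else p.1 + 12), p.2)))).map
            (fun p : Int × String => ((if p.1 ≤ 30 then p.1 else p.1 + 12), p.2))) := by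
    rw [List.map_map]
    exact List.map_congr_left (fun p _ => rfl)
  rw [hsnd, ← List.filter_map, pvEnumEq]
  have h2 : ((pvTableP.map Prod.fst).filter (fun k => decide (k ∈ decimals))).map pvName
      = (pvTableP.filter ((fun k => decide (k ∈ decimals)) ∘ Prod.fst)).map (pvName ∘ Prod.fst) := by
    rw [List.filter_map, List.map_map]
  rw [h2]
  apply List.map_congr_left
  intro kv hkv
  have hmem : kv ∈ pvTableP := (List.mem_filter.mp hkv).1
  simp [Function.comp, pvName, pvPairLookup kv hmem]

-- the two filtered key lists coincide: both strictly increasing with the same members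
theorem pvFilters_eq (decimals : List Int) (hnd : decimals.Nodup) :
    (PySem.List.sorted decimals (fun x => x) false).filter (fun d => decide (d ∈ pvTableP.map Prod.fst))
      = (pvTableP.map Prod.fst).filter (fun k => decide (k ∈ decimals)) := by
  set S := PySem.List.sorted decimals (fun x => x) false with hS
  have hperm : S.Perm decimals := PySem.List.sorted_perm decimals (fun x => x) false
  have hSnd : S.Nodup := hperm.nodup_iff.mpr hnd
  have hSle : S.Pairwise (fun a b => a ≤ b) := PySem.List.sorted_pairwise decimals (fun x => x)
  have hSlt : S.Pairwise (· < ·) := by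
    have := List.Pairwise.and hSle hSnd
    exact this.imp (fun h => lt_of_le_of_ne h.1 h.2)
  have h1 : (S.filter (fun d => decide (d ∈ pvTableP.map Prod.fst))).Pairwise (· < ·) := hSlt.filter _
  have h2 : ((pvTableP.map Prod.fst).filter (fun k => decide (k ∈ decimals))).Pairwise (· < ·) :=
    pvKeysLt.filter _
  refine List.Perm.eq_of_pairwise (fun a b _ _ hab hba => absurd hba (not_lt.mpr hab.le)) h1 h2 ?_
  refine (List.perm_ext_iff_of_nodup (hSnd.filter _) ((pvKeysLt.imp ne_of_lt).filter _)).mpr ?_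
  intro a
  simp only [List.mem_filter, decide_eq_true_eq]
  constructor
  · rintro ⟨ha, hk⟩
    exact ⟨hk, (PySem.List.mem_sorted decimals (fun x => x) false a).mp ha⟩
  · rintro ⟨hk, ha⟩
    exact ⟨(PySem.List.mem_sorted decimals (fun x => x) false a).mpr ha, hk⟩

-- ===== VERDICT (by name: the statement is the Claim_ definition above) =====
theorem decimal_names_py_spec : Claim_equal_decimal_names_py := by
  intro decimals _ hpre
  unfold Spec_decimal_names_py decimal_names_py
  rw [pvA_shape, pvB_shape, pvFilters_eq decimals hpre]
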